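-- pv_equiv track=rewrite | github.com/romeorizzi/TALight | example_problems/tutorial/cypher_game/services/cypher_game_lib.py | grundy_val
-- ===== SOURCE A (Python) =====
-- from itertools import count, filterfalse
--
-- def find_all_moves(n, rmv_dup=False):
--     t=n
--     moves=[]
--     while t>0:
--         sub=t%10
--         if sub!=0:
--             moves.append(n-sub)
--         t=t//10
--     if rmv_dup:
--         moves=list(dict.fromkeys(moves))
--     return moves
--
-- def grundy_val(n):
--     if n%10==0:
--         return 0
--     t=n
--     cyphers=[]
--     while t>0:
--         sub=t%10
--         if sub!=0:
--             cyphers.append(sub)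
--         t=t//10
--     if len(set(cyphers))==1 or (n>0 and n<10) or (len(set(cyphers))==2 and 0 in set(cyphers)):
--         return 1
--     val1=[0,1,1,1,1,1,1,1,1,1]
--     val2=[]
--     for num in range(10,n+1,10):
--         for i in range(10):
--             actual_num=num+i
--             moves=find_all_moves(actual_num,True)
--             values=[]
--             for move in moves:
--                 cypher2=actual_num%10
--                 if move<actual_num-cypher2:
--                     values.append(val1[move%10])
--                 else:
--                     values.append(val2[move%10])
--             val2.append(min_value(values))
--             if actual_num==n:
--                 return val2[n%10]
--         val1=val2
--         val2=[]
--
-- def min_value(list):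
--     if 0 not in list:
--         return 0
--     return next(filterfalse(set(list).__contains__, count(1)))
-- ===== SOURCE B (Python) =====
-- def _digits(m):
--     ds = set()
--     while m > 0:
--         ds.add(m % 10)
--         m //= 10
--     ds.discard(0)
--     return ds
--
-- def _mex(vals):
--     s = set(vals)
--     g = 0
--     while g in s:
--         g += 1
--     return g
--
-- def grundy_val(n):
--     dp = []
--     for m in range(n + 1):
--         dp.append(_mex([dp[m - d] for d in _digits(m)]))
--     return dp[n]
-- ===== Notes on version B (the rewrite author's own statement) =====
-- stated objective: simpler
-- what changed: Replaces the special-case early returns, the find_all_moves helper and the rolling two-decade val1/val2 arrays indexed by move%10 with one plain full Grundy table dp[0..n] filled by the raw recurrence dp[m] = mex(dp[m-d] for distinct nonzero digits d of m).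
-- outside the precondition, e.g. on grundy_val(-10): A returns 0, B raises IndexError; on grundy_val(-3): A returns None, B raises IndexError
import Mathlib
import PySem

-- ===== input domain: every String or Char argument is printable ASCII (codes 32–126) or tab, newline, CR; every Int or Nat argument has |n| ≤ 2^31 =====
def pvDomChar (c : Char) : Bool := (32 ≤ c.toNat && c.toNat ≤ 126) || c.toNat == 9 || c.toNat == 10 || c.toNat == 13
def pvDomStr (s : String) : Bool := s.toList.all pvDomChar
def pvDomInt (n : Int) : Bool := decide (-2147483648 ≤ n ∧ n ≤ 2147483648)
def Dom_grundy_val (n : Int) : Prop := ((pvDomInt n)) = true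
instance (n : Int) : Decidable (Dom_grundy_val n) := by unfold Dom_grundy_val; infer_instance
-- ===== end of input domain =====

-- B replaces A's early returns, find_all_moves and the rolling two-decade val1/val2 arrays with one
-- full Grundy table filled by the raw recurrence dp[m] = mex(dp[m-d]); objective: simpler.

-- termination helper for the `while t > 0: ... t //= 10` loops of both ports
theorem pvDiv10_toNat_lt (t : Int) (h : 0 < t) :
    (PySem.Int.floordiv t 10).toNat < t.toNat := by
  rw [PySem.Int.floordiv_eq_ediv_of_pos (by omega)]
  omega

-- ===== PORT A =====

-- `while t>0: sub=t%10; if sub!=0: moves.append(n-sub); t//=10`   (body of find_all_moves)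
def pvMovesLoop (n : Int) (t : Int) (moves : List Int) : List Int :=
  if h : 0 < t then
    pvMovesLoop n (PySem.Int.floordiv t 10)
      (if PySem.Int.mod t 10 ≠ 0 then moves ++ [n - PySem.Int.mod t 10] else moves)
  else moves
termination_by t.toNat
decreasing_by exact pvDiv10_toNat_lt t h

-- `list(dict.fromkeys(moves))` is PySem.List.dedup (first occurrences, in order)
def pvFindAllMoves (n : Int) (rmvDup : Bool) : List Int :=
  let moves := pvMovesLoop n n []
  if rmvDup then PySem.List.dedup moves else moves

-- `next(filterfalse(set(list).__contains__, count(1)))`: the while-search from 1;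
-- fuel `length+1` covers it (among 1..len+1 one value is missing from the list), see pvMexGo_spec
def pvMinValueGo (s : List Int) (i : Int) : Nat → Int
  | 0 => i
  | f + 1 => if i ∈ s then pvMinValueGo s (i + 1) f else i

def pvMinValue (l : List Int) : Int :=
  if (0 : Int) ∈ l then pvMinValueGo l 1 (l.length + 1) else 0

-- `while t>0: sub=t%10; if sub!=0: cyphers.append(sub); t//=10`
def pvCyphersLoop (t : Int) (cyphers : List Int) : List Int :=
  if h : 0 < t then
    pvCyphersLoop (PySem.Int.floordiv t 10)
      (if PySem.Int.mod t 10 ≠ 0 then cyphers ++ [PySem.Int.mod t 10] else cyphers)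
  else cyphers
termination_by t.toNat
decreasing_by exact pvDiv10_toNat_lt t h

-- the inner `for i in range(10)` loop; `.inl ans` models the early `return val2[n%10]`.
-- list indexing val1[move%10] / val2[move%10] / val2[n%10] is in range whenever Python reaches it
-- (see the invariant lemmas below), so pyGetD with default 0 is exact there.
def pvInnerGo (n num : Int) (val1 : List Int) (val2 : List Int) (i : Nat) : Sum Int (List Int) :=
  if i < 10 then
    let actual := num + (i : Int)
    let moves := pvFindAllMoves actual true
    let cypher2 := PySem.Int.mod actual 10
    let values := moves.map (fun move =>
      if move < actual - cypher2 then PySem.List.pyGetD val1 (PySem.Int.mod move 10) 0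
      else PySem.List.pyGetD val2 (PySem.Int.mod move 10) 0)
    let val2' := val2 ++ [pvMinValue values]
    if actual = n then Sum.inl (PySem.List.pyGetD val2' (PySem.Int.mod n 10) 0)
    else pvInnerGo n num val1 val2' (i + 1)
  else Sum.inr val2
termination_by 10 - i

-- the outer `for num in range(10, n+1, 10)` loop; fuel = length of that range = (n//10).toNat;
-- fuel 0 (loop exhausted) is Python's fall-through `return None`, reached only outside Pre_: 0 as placeholder
def pvOuter (n : Int) (val1 : List Int) (num : Int) : Nat → Int
  | 0 => 0
  | f + 1 =>
    match pvInnerGo n num val1 [] 0 with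
    | .inl ans => ans
    | .inr val2 => pvOuter n val2 (num + 10) f

def grundy_val (n : Int) : Int :=
  if PySem.Int.mod n 10 = 0 then 0
  else
    let cyphers := pvCyphersLoop n []
    let s : PySem.Set Int := PySem.Set.ofList cyphers
    if s.length = 1 ∨ (0 < n ∧ n < 10) ∨ (s.length = 2 ∧ (0 : Int) ∈ s) then 1
    else pvOuter n [0, 1, 1, 1, 1, 1, 1, 1, 1, 1] 10 (PySem.Int.floordiv n 10).toNat

-- ===== PORT B =====

-- `while m > 0: ds.add(m % 10); m //= 10`
def pvDigitsLoop (m : Int) (ds : PySem.Set Int) : PySem.Set Int :=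
  if h : 0 < m then
    pvDigitsLoop (PySem.Int.floordiv m 10) (PySem.Set.add ds (PySem.Int.mod m 10))
  else ds
termination_by m.toNat
decreasing_by exact pvDiv10_toNat_lt m h

def pvDigits (m : Int) : PySem.Set Int :=
  PySem.Set.discard (pvDigitsLoop m PySem.Set.empty) 0

-- `g = 0; while g in s: g += 1`; fuel `len+1` covers the search (see pvMexGo_spec)
def pvMexGo (s : List Int) (g : Int) : Nat → Int
  | 0 => g
  | f + 1 => if g ∈ s then pvMexGo s (g + 1) f else g

def pvMex (vals : List Int) : Int :=
  let s : PySem.Set Int := PySem.Set.ofList vals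
  pvMexGo s 0 (s.length + 1)

-- the mex of [dp[m-d] for d in _digits(m)] does not depend on the set's iteration order
def grundy_val_alt (n : Int) : Int :=
  let dp := (PySem.List.pyRange 0 (n + 1) 1).foldl
    (fun dp m =>
      dp ++ [pvMex ((pvDigits m).map (fun d => PySem.List.pyGetD dp (m - d) 0))]) []
  PySem.List.pyGetD dp n 0   -- dp[n]; for n < 0 Python raises IndexError (outside Pre_)

-- ===== PRECONDITION & SPEC =====

-- Pre_ excludes negative n: there A falls through and returns None (not an int) except at negative
-- multiples of 10, where the n%10==0 shortcut accidentally returns 0; B raises IndexError on all n < 0.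
def Pre_grundy_val (n : Int) : Prop := 0 ≤ n
instance (n : Int) : Decidable (Pre_grundy_val n) := by unfold Pre_grundy_val; infer_instance

def pvWitness_grundy_val : Int := (12)

def Spec_grundy_val (n : Int) (out : Int) : Prop := out = grundy_val_alt n
instance (n : Int) (out : Int) : Decidable (Spec_grundy_val n out) := by unfold Spec_grundy_val; infer_instance

-- ===== CLAIM (what is proved, stated in full; the proofs are below) =====
def Claim_equal_grundy_val : Prop :=
  ∀ (n : Int), Dom_grundy_val n → Pre_grundy_val n → Spec_grundy_val n (grundy_val n)

-- ===== LEMMAS AND PROOFS =====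

-- math layer: nonzero decimal digits of a natural number, and the Grundy value G

def digitsM (m : Nat) : List Nat :=
  if 0 < m then
    (if m % 10 = 0 then digitsM (m / 10) else m % 10 :: digitsM (m / 10))
  else []
termination_by m
decreasing_by all_goals exact Nat.div_lt_self (by omega) (by omega)

theorem mem_digitsM {d m : Nat} (h : d ∈ digitsM m) : 1 ≤ d ∧ d ≤ 9 ∧ d ≤ m := by
  induction m using Nat.strong_induction_on with
  | _ m ih =>
    rw [digitsM] at h
    by_cases hm : 0 < m
    · simp only [if_pos hm] at h
      by_cases h10 : m % 10 = 0
      · simp only [if_pos h10] at h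
        have := ih (m / 10) (Nat.div_lt_self hm (by omega)) h
        omega
      · simp only [if_neg h10, List.mem_cons] at h
        rcases h with h | h
        · omega
        · have := ih (m / 10) (Nat.div_lt_self hm (by omega)) h
          omega
    · simp [if_neg hm] at h

def G (m : Nat) : Int :=
  pvMex ((digitsM m).attach.map (fun d => G (m - d.1)))
termination_by m
decreasing_by
  have := mem_digitsM d.2
  omega

-- mex machinery
def IsMexOf (P : Int → Prop) (v : Int) : Prop := 0 ≤ v ∧ ¬ P v ∧ ∀ j, 0 ≤ j → j < v → P j

theorem IsMexOf_unique {P : Int → Prop} {v w : Int} (hv : IsMexOf P v) (hw : IsMexOf P w) : v = w := by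
  rcases hv with ⟨hv0, hvn, hvb⟩
  rcases hw with ⟨hw0, hwn, hwb⟩
  by_contra hne
  rcases lt_or_gt_of_ne hne with h | h
  · exact hvn (hwb v hv0 h)
  · exact hwn (hvb w hw0 h)

theorem IsMexOf_congr {P Q : Int → Prop} {v : Int} (h : ∀ x, P x ↔ Q x) (hv : IsMexOf P v) :
    IsMexOf Q v := by
  rcases hv with ⟨h0, hn, hb⟩
  exact ⟨h0, fun hq => hn ((h v).2 hq), fun j hj0 hjv => (h j).1 (hb j hj0 hjv)⟩

theorem pvMexGo_spec (s : List Int) :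
    ∀ (f : Nat) (g : Int), (∃ j, g ≤ j ∧ j < g + (f : Int) ∧ j ∉ s) →
      pvMexGo s g f ∉ s ∧ g ≤ pvMexGo s g f ∧ ∀ j, g ≤ j → j < pvMexGo s g f → j ∈ s := by
  intro f
  induction f with
  | zero =>
    intro g ⟨j, h1, h2, _⟩
    simp only [Nat.cast_zero, add_zero] at h2
    omega
  | succ f ih =>
    intro g hex
    rw [pvMexGo]
    by_cases hg : g ∈ s
    · simp only [if_pos hg]
      have hex' : ∃ j, g + 1 ≤ j ∧ j < g + 1 + (f : Int) ∧ j ∉ s := by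
        rcases hex with ⟨j, h1, h2, h3⟩
        refine ⟨j, ?_, by push_cast at h2 ⊢; omega, h3⟩
        rcases eq_or_lt_of_le h1 with rfl | h
        · exact absurd hg h3
        · omega
      obtain ⟨r1, r2, r3⟩ := ih (g + 1) hex'
      refine ⟨r1, by omega, fun j hj1 hj2 => ?_⟩
      rcases eq_or_lt_of_le hj1 with rfl | h
      · exact hg
      · exact r3 j (by omega) hj2
    · simp only [if_neg hg]
      exact ⟨hg, le_refl g, fun j h1 h2 => absurd h1 (by omega)⟩

-- pigeonhole: among 0..len(s) (resp. 1..len(s)+1 when 0 ∈ s) some value is missing from s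
theorem pv_exists_gap (s : List Int) (g : Nat) (hlow : ∀ k : Nat, k < g → (k : Int) ∈ s) :
    ∃ j : Int, (g : Int) ≤ j ∧ j < (g : Int) + ((s.length + 1 : Nat) : Int) ∧ j ∉ s := by
  by_contra hc
  push_neg at hc
  have hsub : ((List.range (g + s.length + 1)).map (fun k : Nat => (k : Int))) ⊆ s := by
    intro x hx
    simp only [List.mem_map, List.mem_range] at hx
    obtain ⟨k, hk, rfl⟩ := hx
    by_cases hkg : k < g
    · exact hlow k hkg
    · exact hc (k : Int) (by omega) (by push_cast; omega)
  have hnd : ((List.range (g + s.length + 1)).map (fun k : Nat => (k : Int))).Nodup :=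
    List.Nodup.map (fun a b h => by exact_mod_cast h) List.nodup_range
  have := (List.subperm_of_subset hnd hsub).length_le
  simp only [List.length_map, List.length_range] at this
  omega

theorem pvMex_isMex (l : List Int) : IsMexOf (· ∈ l) (pvMex l) := by
  unfold pvMex
  have hmem : ∀ x : Int, x ∈ (PySem.Set.ofList l : List Int) ↔ x ∈ l := fun x => PySem.Set.mem_ofList l x
  have hex : ∃ j : Int, (0:Int) ≤ j ∧ j < 0 + (((PySem.Set.ofList l : List Int).length + 1 : Nat) : Int) ∧ j ∉ (PySem.Set.ofList l : List Int) := by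
    obtain ⟨j, h1, h2, h3⟩ := pv_exists_gap (PySem.Set.ofList l) 0 (by omega)
    exact ⟨j, by exact_mod_cast h1, by push_cast at h2 ⊢; omega, h3⟩
  obtain ⟨r1, r2, r3⟩ := pvMexGo_spec (PySem.Set.ofList l) ((PySem.Set.ofList l : List Int).length + 1) 0 hex
  exact ⟨r2, fun h => r1 ((hmem _).2 h), fun j hj0 hjv => (hmem _).1 (r3 j hj0 hjv)⟩

theorem pvMinValueGo_eq_pvMexGo (s : List Int) : ∀ (f : Nat) (i : Int), pvMinValueGo s i f = pvMexGo s i f := by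
  intro f
  induction f with
  | zero => intro i; rfl
  | succ f ih => intro i; rw [pvMinValueGo, pvMexGo, ih]

theorem pvMinValue_isMex (l : List Int) : IsMexOf (· ∈ l) (pvMinValue l) := by
  unfold pvMinValue
  by_cases h0 : (0 : Int) ∈ l
  · simp only [if_pos h0, pvMinValueGo_eq_pvMexGo]
    have hex : ∃ j : Int, (1:Int) ≤ j ∧ j < 1 + ((l.length + 1 : Nat) : Int) ∧ j ∉ l := by
      obtain ⟨j, h1, h2, h3⟩ := pv_exists_gap l 1 (by intro k hk; interval_cases k; exact_mod_cast h0)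
      exact ⟨j, by exact_mod_cast h1, by push_cast at h2 ⊢; omega, h3⟩
    obtain ⟨r1, r2, r3⟩ := pvMexGo_spec l (l.length + 1) 1 hex
    refine ⟨by omega, r1, fun j hj0 hjv => ?_⟩
    rcases eq_or_lt_of_le hj0 with h | h
    · rw [← h]; exact h0
    · exact r3 j (by omega) hjv
  · simp only [if_neg h0]
    exact ⟨le_refl 0, h0, fun j h1 h2 => absurd h1 (by omega)⟩

theorem G_isMex (m : Nat) :
    IsMexOf (fun x => ∃ d ∈ digitsM m, x = G (m - d)) (G m) := by
  rw [G]
  apply IsMexOf_congr (P := (· ∈ (digitsM m).attach.map (fun d => G (m - d.1))))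
  · intro x
    rw [List.mem_map]
    constructor
    · rintro ⟨⟨d, hd⟩, -, rfl⟩; exact ⟨d, hd, rfl⟩
    · rintro ⟨d, hd, rfl⟩; exact ⟨⟨d, hd⟩, List.mem_attach _ _, rfl⟩
  · exact pvMex_isMex _

-- the two key game facts
theorem mod10_mem_digitsM {m : Nat} (h : m % 10 ≠ 0) : m % 10 ∈ digitsM m := by
  rw [digitsM, if_pos (by omega : 0 < m), if_neg h]
  exact List.mem_cons_self

theorem G_zero_iff (m : Nat) : G m = 0 ↔ m % 10 = 0 := by
  induction m using Nat.strong_induction_on with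
  | _ m ih =>
    obtain ⟨h0, hn, hb⟩ := G_isMex m
    constructor
    · intro hG
      by_contra h10
      have hd := mod10_mem_digitsM h10
      have hm : 1 ≤ m % 10 ∧ m % 10 ≤ 9 ∧ m % 10 ≤ m := mem_digitsM hd
      have hlt : m - m % 10 < m := by omega
      have hz : G (m - m % 10) = 0 := (ih _ hlt).2 (by omega)
      exact hn (hG ▸ ⟨m % 10, hd, hz.symm⟩)
    · intro h10
      by_contra hG
      have hpos : 0 < G m := by omega
      obtain ⟨d, hd, hdz⟩ := hb 0 le_rfl hpos
      have hm := mem_digitsM hd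
      have hlt : m - d < m := by omega
      have : (m - d) % 10 ≠ 0 := by omega
      exact this ((ih _ hlt).1 hdz.symm)

theorem G_one_of_rep (m : Nat) (h0 : m % 10 ≠ 0) (hall : ∀ d ∈ digitsM m, d = m % 10) :
    G m = 1 := by
  have hd0 := mod10_mem_digitsM h0
  have hm := mem_digitsM hd0
  have hz : G (m - m % 10) = 0 := (G_zero_iff _).2 (by omega)
  refine IsMexOf_unique (G_isMex m) ⟨by omega, ?_, ?_⟩
  · rintro ⟨d, hd, h1⟩
    rw [hall d hd, hz] at h1
    exact absurd h1 (by norm_num)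
  · intro j hj0 hj1
    have : j = 0 := by omega
    exact this ▸ ⟨m % 10, hd0, hz.symm⟩

theorem digitsM_single {m : Nat} (h1 : 1 ≤ m) (h9 : m ≤ 9) : digitsM m = [m] := by
  have e1 : m % 10 = m := by omega
  have e2 : m / 10 = 0 := by omega
  rw [digitsM, if_pos (by omega : 0 < m), e1, e2, if_neg (by omega), digitsM]
  simp

theorem G_small {k : Nat} (h1 : 1 ≤ k) (h9 : k ≤ 9) : G k = 1 := by
  refine G_one_of_rep k (by omega) ?_
  intro d hd
  rw [digitsM_single h1 h9] at hd
  simp at hd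
  omega

-- A's cyphers / moves loops compute the nonzero decimal digits
theorem pvCyphersLoop_eq : ∀ (k : Nat) (t : Int), t.toNat ≤ k → ∀ acc,
    pvCyphersLoop t acc = acc ++ (digitsM t.toNat).map (fun d : Nat => (d : Int)) := by
  intro k
  induction k with
  | zero =>
    intro t ht acc
    rw [pvCyphersLoop, dif_neg (by omega : ¬ 0 < t)]
    have : t.toNat = 0 := by omega
    rw [this, digitsM]
    simp
  | succ k ih =>
    intro t ht acc
    rw [pvCyphersLoop]
    by_cases hp : 0 < t
    · rw [dif_pos hp]
      obtain ⟨a, rfl⟩ : ∃ a : Nat, t = (a : Int) := ⟨t.toNat, by omega⟩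
      have ha : 0 < a := by exact_mod_cast hp
      have hdiv : PySem.Int.floordiv ((a : Int)) 10 = ((a / 10 : Nat) : Int) := by
        rw [PySem.Int.floordiv_eq_ediv_of_pos (by omega)]; omega
      have hmod : PySem.Int.mod ((a : Int)) 10 = ((a % 10 : Nat) : Int) := by
        rw [PySem.Int.mod_eq_emod_of_pos (by omega)]; omega
      rw [hdiv, hmod]
      rw [ih ((a / 10 : Nat) : Int) (by simp; omega) _]
      simp only [Int.toNat_natCast]
      have hdig : digitsM a = if a % 10 = 0 then digitsM (a / 10) else a % 10 :: digitsM (a / 10) := by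
        rw [digitsM, if_pos ha]
      rw [hdig]
      by_cases h10 : a % 10 = 0
      · rw [if_pos h10, if_neg (by simp [h10])]
      · rw [if_neg h10, if_pos (by exact_mod_cast h10)]
        simp
    · rw [dif_neg hp]
      have : t.toNat = 0 := by omega
      rw [this, digitsM]
      simp

theorem pvMovesLoop_eq : ∀ (k : Nat) (n t : Int), t.toNat ≤ k → ∀ acc,
    pvMovesLoop n t acc = acc ++ (digitsM t.toNat).map (fun d : Nat => n - (d : Int)) := by
  intro k
  induction k with
  | zero =>
    intro n t ht acc
    rw [pvMovesLoop, dif_neg (by omega : ¬ 0 < t)]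
    have : t.toNat = 0 := by omega
    rw [this, digitsM]
    simp
  | succ k ih =>
    intro n t ht acc
    rw [pvMovesLoop]
    by_cases hp : 0 < t
    · rw [dif_pos hp]
      obtain ⟨a, rfl⟩ : ∃ a : Nat, t = (a : Int) := ⟨t.toNat, by omega⟩
      have ha : 0 < a := by exact_mod_cast hp
      have hdiv : PySem.Int.floordiv ((a : Int)) 10 = ((a / 10 : Nat) : Int) := by
        rw [PySem.Int.floordiv_eq_ediv_of_pos (by omega)]; omega
      have hmod : PySem.Int.mod ((a : Int)) 10 = ((a % 10 : Nat) : Int) := by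
        rw [PySem.Int.mod_eq_emod_of_pos (by omega)]; omega
      rw [hdiv, hmod]
      rw [ih n ((a / 10 : Nat) : Int) (by simp; omega) _]
      simp only [Int.toNat_natCast]
      have hdig : digitsM a = if a % 10 = 0 then digitsM (a / 10) else a % 10 :: digitsM (a / 10) := by
        rw [digitsM, if_pos ha]
      rw [hdig]
      by_cases h10 : a % 10 = 0
      · rw [if_pos h10, if_neg (by simp [h10])]
      · rw [if_neg h10, if_pos (by exact_mod_cast h10)]
        simp
    · rw [dif_neg hp]
      have : t.toNat = 0 := by omega
      rw [this, digitsM]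
      simp

-- B's digit-set loop: all decimal digits (including 0), as a set
def digitsA (m : Nat) : List Nat :=
  if 0 < m then m % 10 :: digitsA (m / 10) else []
termination_by m
decreasing_by exact Nat.div_lt_self (by omega) (by omega)

theorem mem_digitsM_iff (d m : Nat) : d ∈ digitsM m ↔ d ∈ digitsA m ∧ d ≠ 0 := by
  induction m using Nat.strong_induction_on with
  | _ m ih =>
    rw [digitsM, digitsA]
    by_cases hp : 0 < m
    · rw [if_pos hp, if_pos hp]
      have ihm := ih (m / 10) (Nat.div_lt_self hp (by omega))
      by_cases h10 : m % 10 = 0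
      · rw [if_pos h10]
        simp only [List.mem_cons, ihm]
        constructor
        · rintro ⟨h, hz⟩; exact ⟨Or.inr h, hz⟩
        · rintro ⟨h | h, hz⟩
          · exact absurd (h ▸ h10) hz
          · exact ⟨h, hz⟩
      · rw [if_neg h10]
        simp only [List.mem_cons, ihm]
        constructor
        · rintro (rfl | ⟨h, hz⟩)
          · exact ⟨Or.inl rfl, h10⟩
          · exact ⟨Or.inr h, hz⟩
        · rintro ⟨rfl | h, hz⟩
          · exact Or.inl rfl
          · exact Or.inr ⟨h, hz⟩
    · rw [if_neg hp, if_neg hp]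
      simp

theorem pvDigitsLoop_mem : ∀ (k : Nat) (m : Int), m.toNat ≤ k → ∀ (s : PySem.Set Int) (x : Int),
    x ∈ pvDigitsLoop m s ↔ x ∈ s ∨ ∃ d ∈ digitsA m.toNat, x = (d : Int) := by
  intro k
  induction k with
  | zero =>
    intro m hm s x
    rw [pvDigitsLoop, dif_neg (by omega : ¬ 0 < m)]
    have : m.toNat = 0 := by omega
    rw [this, digitsA]
    simp
  | succ k ih =>
    intro m hm s x
    rw [pvDigitsLoop]
    by_cases hp : 0 < m
    · rw [dif_pos hp]
      obtain ⟨a, rfl⟩ : ∃ a : Nat, m = (a : Int) := ⟨m.toNat, by omega⟩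
      have ha : 0 < a := by exact_mod_cast hp
      have hdiv : PySem.Int.floordiv ((a : Int)) 10 = ((a / 10 : Nat) : Int) := by
        rw [PySem.Int.floordiv_eq_ediv_of_pos (by omega)]; omega
      have hmod : PySem.Int.mod ((a : Int)) 10 = ((a % 10 : Nat) : Int) := by
        rw [PySem.Int.mod_eq_emod_of_pos (by omega)]; omega
      rw [hdiv, hmod]
      rw [ih ((a / 10 : Nat) : Int) (by simp; omega) _ x]
      rw [PySem.Set.mem_add]
      simp only [Int.toNat_natCast]
      have hdig : digitsA a = a % 10 :: digitsA (a / 10) := by rw [digitsA, if_pos ha]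
      rw [hdig]
      constructor
      · rintro ((h | rfl) | ⟨d, hd, rfl⟩)
        · exact Or.inl h
        · exact Or.inr ⟨a % 10, List.mem_cons_self, rfl⟩
        · exact Or.inr ⟨d, List.mem_cons_of_mem _ hd, rfl⟩
      · rintro (h | ⟨d, hd, rfl⟩)
        · exact Or.inl (Or.inl h)
        · rcases List.mem_cons.1 hd with rfl | hd
          · exact Or.inl (Or.inr rfl)
          · exact Or.inr ⟨d, hd, rfl⟩
    · rw [dif_neg hp]
      have : m.toNat = 0 := by omega
      rw [this, digitsA]
      simp

theorem pvDigits_mem (m : Int) (x : Int) :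
    x ∈ pvDigits m ↔ ∃ d ∈ digitsM m.toNat, x = (d : Int) := by
  unfold pvDigits
  rw [PySem.Set.mem_discard, pvDigitsLoop_mem m.toNat m le_rfl PySem.Set.empty x]
  constructor
  · rintro ⟨h | ⟨d, hd, rfl⟩, hz⟩
    · exact absurd h (by simp [PySem.Set.empty])
    · refine ⟨d, (mem_digitsM_iff d m.toNat).2 ⟨hd, ?_⟩, rfl⟩
      intro h
      exact hz (by exact_mod_cast h)
  · rintro ⟨d, hd, rfl⟩
    obtain ⟨hA, hz⟩ := (mem_digitsM_iff d m.toNat).1 hd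
    exact ⟨Or.inr ⟨d, hA, rfl⟩, by exact_mod_cast hz⟩

-- ===== B = G =====

theorem alt_fold (k : Nat) :
    ((PySem.List.pyRange 0 (k : Int) 1).foldl
      (fun dp m =>
        dp ++ [pvMex ((pvDigits m).map (fun d => PySem.List.pyGetD dp (m - d) 0))]) [])
    = (List.range k).map (fun j => G j) := by
  induction k with
  | zero => simp [PySem.List.pyRange_one_eq_nil]
  | succ k ih =>
    have hc : ((k + 1 : Nat) : Int) = (k : Int) + 1 := by push_cast; ring
    rw [hc, PySem.List.pyRange_one_succ_right (by positivity), List.foldl_append, ih]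
    rw [List.range_succ, List.map_append]
    simp only [List.foldl_cons, List.foldl_nil, List.map_cons, List.map_nil]
    congr 1
    congr 1
    refine IsMexOf_unique (IsMexOf_congr ?_ (pvMex_isMex _)) (G_isMex k)
    intro x
    rw [List.mem_map]
    constructor
    · rintro ⟨dI, hdI, rfl⟩
      rw [pvDigits_mem] at hdI
      obtain ⟨d, hd, rfl⟩ := hdI
      rw [Int.toNat_natCast] at hd
      have hb := mem_digitsM hd
      have hcast : (k : Int) - (d : Int) = ((k - d : Nat) : Int) := by push_cast [Nat.cast_sub hb.2.2]; ring
      rw [hcast, PySem.List.pyGetD_natCast, PySem.List.getD_map_range _ _ _ _ (by omega)]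
      exact ⟨d, hd, rfl⟩
    · rintro ⟨d, hd, rfl⟩
      have hb := mem_digitsM hd
      refine ⟨(d : Int), ?_, ?_⟩
      · rw [pvDigits_mem, Int.toNat_natCast]
        exact ⟨d, hd, rfl⟩
      · have hcast : (k : Int) - (d : Int) = ((k - d : Nat) : Int) := by push_cast [Nat.cast_sub hb.2.2]; ring
        rw [hcast, PySem.List.pyGetD_natCast, PySem.List.getD_map_range _ _ _ _ (by omega)]

theorem alt_eq_G (n : Int) (h : 0 ≤ n) : grundy_val_alt n = G n.toNat := by
  obtain ⟨k, rfl⟩ : ∃ k : Nat, n = (k : Int) := ⟨n.toNat, by omega⟩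
  unfold grundy_val_alt
  have hc : (k : Int) + 1 = ((k + 1 : Nat) : Int) := by push_cast; ring
  rw [hc, alt_fold (k + 1), PySem.List.pyGetD_natCast,
    PySem.List.getD_map_range _ _ _ _ (by omega), Int.toNat_natCast]

-- ===== A = G =====

def mapDec (j : Nat) : List Int := (List.range 10).map (fun r => G (10 * j + r))

-- the value min_value(values) computed for actual_num = 10*j+i is G (10*j+i)
theorem inner_step (j i : Nat) (hj : 1 ≤ j) (hi : i < 10) :
    pvMinValue
      ((pvFindAllMoves (((10 * j + i : Nat) : Int)) true).map (fun move =>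
        if move < ((10 * j + i : Nat) : Int) - PySem.Int.mod ((10 * j + i : Nat) : Int) 10 then
          PySem.List.pyGetD (mapDec (j - 1)) (PySem.Int.mod move 10) 0
        else
          PySem.List.pyGetD ((List.range i).map (fun r => G (10 * j + r))) (PySem.Int.mod move 10) 0))
    = G (10 * j + i) := by
  have hcy2 : PySem.Int.mod ((10 * j + i : Nat) : Int) 10 = (i : Int) := by
    rw [PySem.Int.mod_eq_emod_of_pos (by omega)]; omega
  have hmoves : pvFindAllMoves (((10 * j + i : Nat) : Int)) true
      = PySem.List.dedup ((digitsM (10 * j + i)).map (fun d : Nat => ((10 * j + i : Nat) : Int) - (d : Int))) := by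
    unfold pvFindAllMoves
    rw [pvMovesLoop_eq ((10 * j + i : Nat) : Int).toNat _ _ le_rfl, Int.toNat_natCast]
    rw [List.nil_append, if_pos rfl]
  refine IsMexOf_unique (IsMexOf_congr ?_ (pvMinValue_isMex _)) (G_isMex (10 * j + i))
  intro x
  rw [hmoves, hcy2, List.mem_map]
  constructor
  · rintro ⟨mv, hmv, rfl⟩
    rw [PySem.List.mem_dedup, List.mem_map] at hmv
    obtain ⟨d, hd, rfl⟩ := hmv
    refine ⟨d, hd, ?_⟩
    have hb := mem_digitsM hd
    have hcast : ((10 * j + i : Nat) : Int) - (d : Int) = ((10 * j + i - d : Nat) : Int) := by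
      push_cast [Nat.cast_sub hb.2.2]; ring
    by_cases hdi : i < d
    · rw [if_pos (by push_cast; omega)]
      have hmod : PySem.Int.mod (((10 * j + i : Nat) : Int) - (d : Int)) 10
          = (((10 * j + i - d) % 10 : Nat) : Int) := by
        rw [hcast, PySem.Int.mod_eq_emod_of_pos (by omega)]; omega
      have hval : (10 * j + i - d) % 10 = 10 + i - d := by omega
      rw [hmod, hval, PySem.List.pyGetD_natCast]
      unfold mapDec
      rw [PySem.List.getD_map_range _ _ _ _ (by omega)]
      congr 1
      omega
    · rw [if_neg (by push_cast; omega)]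
      have hmod : PySem.Int.mod (((10 * j + i : Nat) : Int) - (d : Int)) 10
          = (((10 * j + i - d) % 10 : Nat) : Int) := by
        rw [hcast, PySem.Int.mod_eq_emod_of_pos (by omega)]; omega
      have hval : (10 * j + i - d) % 10 = i - d := by omega
      rw [hmod, hval, PySem.List.pyGetD_natCast,
        PySem.List.getD_map_range _ _ _ _ (by omega)]
      congr 1
      omega
  · rintro ⟨d, hd, rfl⟩
    have hb := mem_digitsM hd
    refine ⟨((10 * j + i : Nat) : Int) - (d : Int), ?_, ?_⟩
    · rw [PySem.List.mem_dedup, List.mem_map]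
      exact ⟨d, hd, rfl⟩
    · have hcast : ((10 * j + i : Nat) : Int) - (d : Int) = ((10 * j + i - d : Nat) : Int) := by
        push_cast [Nat.cast_sub hb.2.2]; ring
      by_cases hdi : i < d
      · rw [if_pos (by push_cast; omega)]
        have hmod : PySem.Int.mod (((10 * j + i : Nat) : Int) - (d : Int)) 10
            = (((10 * j + i - d) % 10 : Nat) : Int) := by
          rw [hcast, PySem.Int.mod_eq_emod_of_pos (by omega)]; omega
        have hval : (10 * j + i - d) % 10 = 10 + i - d := by omega
        rw [hmod, hval, PySem.List.pyGetD_natCast]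
        unfold mapDec
        rw [PySem.List.getD_map_range _ _ _ _ (by omega)]
        congr 1
        omega
      · rw [if_neg (by push_cast; omega)]
        have hmod : PySem.Int.mod (((10 * j + i : Nat) : Int) - (d : Int)) 10
            = (((10 * j + i - d) % 10 : Nat) : Int) := by
          rw [hcast, PySem.Int.mod_eq_emod_of_pos (by omega)]; omega
        have hval : (10 * j + i - d) % 10 = i - d := by omega
        rw [hmod, hval, PySem.List.pyGetD_natCast,
          PySem.List.getD_map_range _ _ _ _ (by omega)]
        congr 1
        omega

theorem inner_spec (n' j : Nat) (hj : 1 ≤ j) :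
    ∀ (f i : Nat), i + f = 10 →
      (j < n' / 10 ∨ (j = n' / 10 ∧ i ≤ n' % 10 ∧ n' % 10 ≠ 0)) →
      pvInnerGo (n' : Int) ((10 * j : Nat) : Int) (mapDec (j - 1))
          ((List.range i).map (fun r => G (10 * j + r))) i
        = if j < n' / 10 then Sum.inr (mapDec j) else Sum.inl (G n') := by
  intro f
  induction f with
  | zero =>
    intro i hif H
    have hi : i = 10 := by omega
    subst hi
    have hmod : n' % 10 < 10 := by omega
    have hlt : j < n' / 10 := by
      rcases H with h | ⟨_, h, _⟩
      · exact h
      · omega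
    rw [pvInnerGo, if_neg (by omega), if_pos hlt]
    rfl
  | succ f ih =>
    intro i hif H
    have hi : i < 10 := by omega
    rw [pvInnerGo, if_pos hi]
    have hact : ((10 * j : Nat) : Int) + (i : Int) = ((10 * j + i : Nat) : Int) := by push_cast; ring
    simp only [hact, inner_step j i hj hi]
    by_cases heq : ((10 * j + i : Nat) : Int) = (n' : Int)
    · have heqn : 10 * j + i = n' := by exact_mod_cast heq
      rw [if_pos heq]
      have hjn : ¬ j < n' / 10 := by omega
      rw [if_neg hjn]
      have hmodn : PySem.Int.mod (n' : Int) 10 = ((n' % 10 : Nat) : Int) := by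
        rw [PySem.Int.mod_eq_emod_of_pos (by omega)]; omega
      have hin : n' % 10 = i := by omega
      rw [hmodn, hin, PySem.List.pyGetD_natCast]
      have hlen : ((List.range i).map (fun r => G (10 * j + r))).length = i := by simp
      rw [show (((List.range i).map (fun r => G (10 * j + r))) ++ [G (10 * j + i)]).getD i 0
          = G (10 * j + i) from by rw [← hlen]; simp]
      rw [heqn]
    · rw [if_neg heq]
      have hstep : ((List.range i).map (fun r => G (10 * j + r))) ++ [G (10 * j + i)]
          = (List.range (i + 1)).map (fun r => G (10 * j + r)) := by
        rw [List.range_succ, List.map_append]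
        simp
      rw [hstep]
      apply ih (i + 1) (by omega)
      rcases H with h | ⟨h1, h2, h3⟩
      · exact Or.inl h
      · refine Or.inr ⟨h1, ?_, h3⟩
        have : 10 * j + i ≠ n' := by exact_mod_cast heq
        omega

theorem outer_spec (n' : Nat) (hmod : n' % 10 ≠ 0) (h10 : 10 ≤ n') :
    ∀ (f j : Nat), 1 ≤ j → j ≤ n' / 10 → f = n' / 10 - j + 1 →
      pvOuter (n' : Int) (mapDec (j - 1)) ((10 * j : Nat) : Int) f = G n' := by
  intro f
  induction f with
  | zero => intro j h1 h2 h3; omega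
  | succ f ih =>
    intro j h1 h2 h3
    rw [pvOuter]
    have hin := inner_spec n' j h1 10 0 (by omega)
      (by rcases Nat.lt_or_ge j (n' / 10) with h | h
          · exact Or.inl h
          · exact Or.inr ⟨by omega, by omega, hmod⟩)
    simp only [List.range_zero, List.map_nil] at hin
    rw [hin]
    by_cases hlt : j < n' / 10
    · rw [if_pos hlt]
      have hnum : ((10 * j : Nat) : Int) + 10 = ((10 * (j + 1) : Nat) : Int) := by push_cast; ring
      rw [hnum]
      have := ih (j + 1) (by omega) (by omega) (by omega)
      simpa using this
    · rw [if_neg hlt]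

theorem A_eq_G (n : Int) (h : 0 ≤ n) : grundy_val n = G n.toNat := by
  obtain ⟨n', rfl⟩ : ∃ k : Nat, n = (k : Int) := ⟨n.toNat, by omega⟩
  rw [Int.toNat_natCast]
  unfold grundy_val
  have hmodn : PySem.Int.mod (n' : Int) 10 = ((n' % 10 : Nat) : Int) := by
    rw [PySem.Int.mod_eq_emod_of_pos (by omega)]; omega
  by_cases h10 : n' % 10 = 0
  · rw [if_pos (by rw [hmodn, h10]; rfl)]
    exact ((G_zero_iff n').2 h10).symm
  · rw [if_neg (by rw [hmodn]; exact_mod_cast h10)]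
    have hcy : pvCyphersLoop (n' : Int) [] = (digitsM n').map (fun d : Nat => (d : Int)) := by
      rw [pvCyphersLoop_eq (n' : Int).toNat _ le_rfl, Int.toNat_natCast]
      rw [List.nil_append]
    have hsmem : ∀ x : Int, x ∈ (PySem.Set.ofList (pvCyphersLoop (n' : Int) []) : List Int)
        ↔ ∃ d ∈ digitsM n', x = (d : Int) := by
      intro x
      rw [PySem.Set.mem_ofList, hcy, List.mem_map]
      constructor
      · rintro ⟨d, hd, rfl⟩; exact ⟨d, hd, rfl⟩
      · rintro ⟨d, hd, rfl⟩; exact ⟨d, hd, rfl⟩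
    by_cases hcond : (PySem.Set.ofList (pvCyphersLoop (n' : Int) []) : List Int).length = 1 ∨
        (0 < (n' : Int) ∧ (n' : Int) < 10) ∨
        ((PySem.Set.ofList (pvCyphersLoop (n' : Int) []) : List Int).length = 2 ∧
          (0 : Int) ∈ (PySem.Set.ofList (pvCyphersLoop (n' : Int) []) : List Int))
    · rw [if_pos hcond]
      rcases hcond with hlen | hsm | ⟨_, hzero⟩
      · -- all nonzero digits are equal: Grundy value 1
        obtain ⟨a, ha⟩ := List.length_eq_one_iff.1 hlen
        have hda : ∀ d ∈ digitsM n', (d : Int) = a := by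
          intro d hd
          have : (d : Int) ∈ (PySem.Set.ofList (pvCyphersLoop (n' : Int) []) : List Int) :=
            (hsmem _).2 ⟨d, hd, rfl⟩
          rw [ha] at this
          simpa using this
        have hmem0 := mod10_mem_digitsM h10
        refine (G_one_of_rep n' h10 ?_).symm
        intro d hd
        have h1 := hda d hd
        have h2 := hda _ hmem0
        have : (d : Int) = ((n' % 10 : Nat) : Int) := by rw [h1, h2]
        exact_mod_cast this
      · -- single-digit n
        have h1 : 1 ≤ n' := by exact_mod_cast hsm.1
        have h9 : n' ≤ 9 := by
          have := hsm.2
          omega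
        exact (G_small h1 h9).symm
      · -- 0 is never among the nonzero cyphers
        exfalso
        obtain ⟨d, hd, hdz⟩ := (hsmem 0).1 hzero
        have := mem_digitsM hd
        have : d = 0 := by exact_mod_cast hdz.symm
        omega
    · rw [if_neg hcond]
      -- here n ≥ 10
      have hge : 10 ≤ n' := by
        by_contra hlt
        exact hcond (Or.inr (Or.inl ⟨by exact_mod_cast Nat.pos_of_ne_zero (by omega),
          by exact_mod_cast (by omega : n' < 10)⟩))
      have hfuel : (PySem.Int.floordiv (n' : Int) 10).toNat = n' / 10 := by
        rw [PySem.Int.floordiv_eq_ediv_of_pos (by omega)]; omega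
      have hinit : ([0, 1, 1, 1, 1, 1, 1, 1, 1, 1] : List Int) = mapDec 0 := by
        unfold mapDec
        simp only [List.range_succ, List.range_zero, List.map_append, List.map_cons,
          List.map_nil, List.nil_append, Nat.mul_zero, Nat.zero_add]
        rw [(G_zero_iff 0).2 (by omega)]
        rw [G_small (by omega) (by omega), G_small (by omega) (by omega),
          G_small (by omega) (by omega), G_small (by omega) (by omega),
          G_small (by omega) (by omega), G_small (by omega) (by omega),
          G_small (by omega) (by omega), G_small (by omega) (by omega),
          G_small (by omega) (by omega)]
        rfl
      rw [hfuel, hinit]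
      have h101 : ((10 : Int)) = ((10 * 1 : Nat) : Int) := by norm_num
      rw [h101]
      have := outer_spec n' h10 hge (n' / 10) 1 le_rfl (by omega) (by omega)
      simpa using this

-- ===== VERDICT (by name: the statement is the Claim_ definition above) =====
theorem grundy_val_spec : Claim_equal_grundy_val := by
  intro n _ hpre
  unfold Spec_grundy_val
  rw [A_eq_G n hpre, alt_eq_G n hpre]
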